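-- pv_equiv track=rewrite | github.com/LHTMR/semi-controlled-touch-survey | Analysis/Scripts/plot_maps.py | calculate_grid_layout
-- ===== SOURCE A (Python) =====
-- import math
--
-- def calculate_grid_layout(words):
--     """
--     Implements the custom square-first layout rule.
--     Returns: The ordered list of facets (including invisible dummies), Rows, Columns
--     """
--     N = len(words)
--     if N == 0:
--         return [], 1, 1
--
--     k = int(math.floor(math.sqrt(N)))
--
--     if k * k == N:
--         R, C = k, k
--     elif N <= k * (k + 1):
--         R, C = k, k + 1
--     else:
--         R, C = k + 1, k + 1
--
--     empty_count = R * C - N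
--     layout = [None] * (R * C)
--
--     # Place empty spaces at the top of the last column
--     for r in range(empty_count):
--         # Using increasing spaces ensures categories are unique but visually blank
--         layout[r * C + (C - 1)] = " " * (r + 1)
--
--     # Fill the remaining slots sequentially with actual words
--     word_idx = 0
--     for i in range(len(layout)):
--         if layout[i] is None:
--             layout[i] = words[word_idx]
--             word_idx += 1
--
--     return layout, R, C
-- ===== SOURCE B (Python) =====
-- import math
--
-- def calculate_grid_layout(words):
--     N = len(words)
--     if N == 0:
--         return [], 1, 1
--
--     k = int(math.floor(math.sqrt(N)))
--     if k * k == N: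
--         R, C = k, k
--     elif N <= k * (k + 1):
--         R, C = k, k + 1
--     else:
--         R, C = k + 1, k + 1
--
--     empty = R * C - N
--     it = iter(words)
--     layout = []
--     for i in range(R * C):
--         r, c = divmod(i, C)
--         layout.append(" " * (r + 1) if c == C - 1 and r < empty else next(it))
--     return layout, R, C
-- ===== Notes on version B (the rewrite author's own statement) =====
-- stated objective: simpler
-- what changed: Keeps the O(1) R,C computation but replaces A's None-sentinel array, dummy-placement pass and second fill-the-Nones scan with a single pass over range(R*C) that uses divmod to decide each cell and a word iterator for the rest.
import Mathlib
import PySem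

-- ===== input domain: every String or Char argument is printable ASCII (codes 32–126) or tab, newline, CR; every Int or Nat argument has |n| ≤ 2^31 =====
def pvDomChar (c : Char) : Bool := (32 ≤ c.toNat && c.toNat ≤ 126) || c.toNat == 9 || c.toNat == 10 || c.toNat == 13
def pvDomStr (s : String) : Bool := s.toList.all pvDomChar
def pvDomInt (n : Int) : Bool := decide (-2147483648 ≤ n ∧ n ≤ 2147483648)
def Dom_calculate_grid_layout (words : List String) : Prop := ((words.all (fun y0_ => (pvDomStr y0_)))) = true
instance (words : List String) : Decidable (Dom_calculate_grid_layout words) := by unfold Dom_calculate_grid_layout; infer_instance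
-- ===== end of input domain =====

-- B builds the layout in one pass with divmod and a word iterator, eliminating A's
-- None-sentinel array and its second fill scan (objective: simpler decomposition).

-- ===== PORT A =====
-- " " * (r + 1)
def pvSpaces (r : Nat) : String := String.ofList (List.replicate (r + 1) ' ')

-- the fill loop: for i in range(len(layout)): if layout[i] is None: layout[i] = words[word_idx]; word_idx += 1
-- (the in-place mutation is transcribed as rebuilding the list left to right with the same word_idx state;
--  words[word_idx] is in range whenever Python's is, so getD is exact there)
def pvFillA (words : List String) (layout : List (Option String)) (word_idx : Nat) : List String :=
  match layout with
  | [] => []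
  | some s :: rest => s :: pvFillA words rest word_idx
  | none :: rest => words.getD word_idx "" :: pvFillA words rest (word_idx + 1)

def calculate_grid_layout (words : List String) : List String × Int × Int :=
  let N := words.length
  if N = 0 then ([], 1, 1) else
  let k := Nat.sqrt N
  let RC := if k * k = N then (k, k) else if N ≤ k * (k + 1) then (k, k + 1) else (k + 1, k + 1)
  let R := RC.1
  let C := RC.2
  let empty_count := R * C - N
  let layout0 : List (Option String) := List.replicate (R * C) none
  let layout1 := (List.range empty_count).foldl
      (fun l r => l.set (r * C + (C - 1)) (some (pvSpaces r))) layout0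
  (pvFillA words layout1 0, (R : Int), (C : Int))

-- ===== PORT B =====
-- the single building loop: for i in range(R*C): r,c = divmod(i,C); append spaces or next(it)
-- (next(it) on an exhausted iterator never happens in Python; headD ""/tail is exact where it returns)
def pvBuildB (C e : Nat) (idxs : List Nat) (ws : List String) : List String :=
  match idxs with
  | [] => []
  | i :: rest =>
    if i % C = C - 1 ∧ i / C < e then
      pvSpaces (i / C) :: pvBuildB C e rest ws
    else
      ws.headD "" :: pvBuildB C e rest ws.tail

def calculate_grid_layout_alt (words : List String) : List String × Int × Int :=
  let N := words.length
  if N = 0 then ([], 1, 1) else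
  let k := Nat.sqrt N
  let RC := if k * k = N then (k, k) else if N ≤ k * (k + 1) then (k, k + 1) else (k + 1, k + 1)
  let R := RC.1
  let C := RC.2
  let empty := R * C - N
  (pvBuildB C empty (List.range (R * C)) words, (R : Int), (C : Int))

-- ===== PRECONDITION & SPEC =====
def Spec_calculate_grid_layout (words : List String) (out : List String × Int × Int) : Prop := out = calculate_grid_layout_alt words
instance (words : List String) (out : List String × Int × Int) : Decidable (Spec_calculate_grid_layout words out) := by unfold Spec_calculate_grid_layout; infer_instance

-- ===== CLAIM (what is proved, stated in full; the proofs are below) =====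
def Claim_equal_calculate_grid_layout : Prop := ∀ (words : List String), Dom_calculate_grid_layout words → Spec_calculate_grid_layout words (calculate_grid_layout words)

-- ===== LEMMAS AND PROOFS =====

-- sequential filler that consumes a word list (bridge between A's index and B's iterator)
def pvFillSeq (layout : List (Option String)) (ws : List String) : List String :=
  match layout with
  | [] => []
  | some s :: rest => s :: pvFillSeq rest ws
  | none :: rest => ws.headD "" :: pvFillSeq rest ws.tail

lemma fillA_eq_fillSeq (words : List String) (layout : List (Option String)) (j : Nat) :
    pvFillA words layout j = pvFillSeq layout (words.drop j) := by
  induction layout generalizing j with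
  | nil => rfl
  | cons c rest ih =>
    cases c with
    | some s => simp [pvFillA, pvFillSeq, ih]
    | none =>
      simp [pvFillA, pvFillSeq, ih (j + 1), List.tail_drop]

lemma buildB_eq_fillSeq (C e : Nat) (idxs : List Nat) (ws : List String) :
    pvBuildB C e idxs ws
      = pvFillSeq (idxs.map (fun i => if i % C = C - 1 ∧ i / C < e then some (pvSpaces (i / C)) else none)) ws := by
  induction idxs generalizing ws with
  | nil => rfl
  | cons i rest ih =>
    by_cases h : i % C = C - 1 ∧ i / C < e <;> simp [pvBuildB, pvFillSeq, h, ih]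

-- characterization of A's dummy-placement phase
lemma layout_char (C R e : Nat) (hC : 0 < C) (heR : e ≤ R) :
    (List.range e).foldl (fun l r => l.set (r * C + (C - 1)) (some (pvSpaces r)))
        (List.replicate (R * C) (none : Option String))
      = (List.range (R * C)).map
          (fun i => if i % C = C - 1 ∧ i / C < e then some (pvSpaces (i / C)) else none) := by
  induction e with
  | zero =>
    rw [List.range_zero, List.foldl_nil]
    rw [show (fun i => if i % C = C - 1 ∧ i / C < 0 then some (pvSpaces (i / C)) else none)
          = (fun _ : Nat => (none : Option String)) by funext i; simp]
    simp [List.map_const']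
  | succ e ih =>
    have he : e < R := heR
    have hidx : e * C + (C - 1) < R * C := by
      have h1 : (e + 1) * C ≤ R * C := Nat.mul_le_mul_right C he
      have h2 : (e + 1) * C = e * C + C := by ring
      omega
    rw [List.range_succ, List.foldl_append, List.foldl_cons, List.foldl_nil,
        ih (Nat.le_of_lt he)]
    apply List.ext_getElem
    · simp
    · intro j hj1 hj2
      have hjlt : j < R * C := by simpa using hj2
      rw [List.getElem_set]
      simp only [List.getElem_map, List.getElem_range]
      have hmod : (e * C + (C - 1)) % C = C - 1 := by
        rw [Nat.add_comm, Nat.add_mul_mod_self_right]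
        exact Nat.mod_eq_of_lt (by omega)
      have hdiv : (e * C + (C - 1)) / C = e := by
        rw [Nat.add_comm, Nat.add_mul_div_right _ _ hC]
        rw [Nat.div_eq_of_lt (by omega)]
        omega
      by_cases heq : e * C + (C - 1) = j
      · subst heq
        simp [hmod, hdiv]
      · rw [if_neg heq]
        have hdm := Nat.div_add_mod j C
        by_cases hm : j % C = C - 1
        · by_cases hd : j / C = e
          · exfalso
            apply heq
            have hce : C * e = e * C := Nat.mul_comm C e
            have : C * (j / C) + j % C = j := hdm
            rw [hd, hm] at this
            omega
          · have : (j / C < e + 1) ↔ (j / C < e) := by omega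
            simp [hm, this]
        · simp [hm]

lemma sqrt_pos_case (N : Nat) (h : Nat.sqrt N * Nat.sqrt N = N) (hN : N ≠ 0) :
    0 < Nat.sqrt N := by
  rcases Nat.eq_zero_or_pos (Nat.sqrt N) with h0 | h0
  · rw [h0] at h; omega
  · exact h0

-- ===== VERDICT (by name: the statement is the Claim_ definition above) =====
theorem calculate_grid_layout_spec : Claim_equal_calculate_grid_layout := by
  intro words _
  unfold Spec_calculate_grid_layout calculate_grid_layout calculate_grid_layout_alt
  by_cases h0 : words.length = 0
  · simp [h0]
  · simp only [h0, if_false]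
    set N := words.length with hN
    set k := Nat.sqrt N with hk
    have hk2 : k * k ≤ N := by simpa [pow_two] using Nat.sqrt_le' N
    set RC := if k * k = N then (k, k) else if N ≤ k * (k + 1) then (k, k + 1) else (k + 1, k + 1) with hRC
    have hC : 0 < RC.2 ∧ RC.1 * RC.2 - N ≤ RC.1 := by
      rw [hRC]
      by_cases h1 : k * k = N
      · have hkpos := sqrt_pos_case N h1 h0
        rw [if_pos h1]
        exact ⟨hkpos, by show k * k - N ≤ k; omega⟩
      · rw [if_neg h1]
        by_cases h2 : N ≤ k * (k + 1)
        · rw [if_pos h2]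
          have h3 : k * (k + 1) = k * k + k := by ring
          exact ⟨by show 0 < k + 1; omega, by show k * (k + 1) - N ≤ k; omega⟩
        · rw [if_neg h2]
          have h3 : (k + 1) * (k + 1) = k * (k + 1) + (k + 1) := by ring
          exact ⟨by show 0 < k + 1; omega, by show (k + 1) * (k + 1) - N ≤ k + 1; omega⟩
    refine Prod.ext ?_ rfl
    simp only []
    rw [layout_char RC.2 RC.1 (RC.1 * RC.2 - N) hC.1 hC.2,
        fillA_eq_fillSeq, List.drop_zero, buildB_eq_fillSeq]
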